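-- pv_equiv track=rewrite | github.com/OcupointInc/Libcatalyst-Python | main.py | bit_reverse
-- ===== SOURCE A (Python) =====
-- def bit_reverse(data, mask):
--     total_bits = 32
--     shift_msb = 0
--     reversed_data = 0
--
--     for ii in range(total_bits):
--         if mask & (1 << (total_bits - 1 - ii)):
--             temp = (data & (1 << (total_bits - 1 - ii)))
--
--             if temp:
--                 reversed_data |= (1 << (shift_msb))
--             else:
--                 reversed_data |= (0 << (shift_msb))
--
--             shift_msb += 1
--
--     return reversed_data
-- ===== SOURCE B (Python) =====
-- def bit_reverse(data, mask):
--     m = mask & 0xFFFFFFFF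
--     result = 0
--     while m:
--         low = m & -m
--         result = 2 * result + (1 if data & low else 0)
--         m -= low
--     return result
-- ===== Notes on version B (the rewrite author's own statement) =====
-- stated objective: alternative
-- what changed: B replaces A's fixed 32-position MSB-first scan (with its shift_msb output-position counter and per-position bit-OR) by a Kernighan-style loop that runs once per SET bit of the 32-bit-truncated mask: it isolates the lowest set bit with low = m & -m, folds the corresponding data bit into a single accumulator result = 2*result + bit, and removes that bit with m -= low, terminating when no mask bits remain.
import Mathlib
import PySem

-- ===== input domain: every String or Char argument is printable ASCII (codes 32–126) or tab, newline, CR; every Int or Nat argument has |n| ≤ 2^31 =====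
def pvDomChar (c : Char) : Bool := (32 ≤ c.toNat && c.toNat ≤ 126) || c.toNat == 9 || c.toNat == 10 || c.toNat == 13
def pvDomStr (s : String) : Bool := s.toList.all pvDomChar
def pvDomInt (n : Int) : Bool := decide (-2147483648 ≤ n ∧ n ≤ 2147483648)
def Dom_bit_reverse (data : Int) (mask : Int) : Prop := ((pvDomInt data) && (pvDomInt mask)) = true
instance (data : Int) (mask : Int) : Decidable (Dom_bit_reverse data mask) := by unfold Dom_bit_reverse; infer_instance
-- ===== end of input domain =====

-- B replaces A's fixed 32-position MSB-first scan (shift_msb counter + per-position OR) by a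
-- Kernighan-style loop over the SET bits of the 32-bit-truncated mask (low = m & -m, m -= low),
-- folding each selected data bit into one accumulator; return values are proved equal everywhere.

-- ===== PORT A =====
-- PySem.Int.band/bor are Python-exact & and |; shift counts are Nat (Python's here are
-- always ≥ 0), and `total_bits - 1 - ii` is exact as Nat subtraction since ii < 32.
def bit_reverse (data : Int) (mask : Int) : Int :=
  let total_bits : Nat := 32
  let st := (List.range total_bits).foldl
    (fun (st : Int × Nat) (ii : Nat) =>
      let reversed_data := st.1
      let shift_msb := st.2
      if PySem.Int.band mask (1 <<< (total_bits - 1 - ii)) ≠ 0 then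
        let temp := PySem.Int.band data (1 <<< (total_bits - 1 - ii))
        if temp ≠ 0 then
          (PySem.Int.bor reversed_data (1 <<< shift_msb), shift_msb + 1)
        else
          (PySem.Int.bor reversed_data (0 <<< shift_msb), shift_msb + 1)
      else st)
    (0, 0)
  st.1

-- ===== PORT B =====
-- helper needed by bLoop's termination proof: `m & -m` (Python semantics) of a nonzero m is positive.
theorem pv_band_self_neg (m : Nat) (h : m ≠ 0) :
    PySem.Int.band (m : Int) (-(m : Int)) = ((m - (m &&& (m - 1)) : Nat) : Int) := by
  unfold PySem.Int.band
  rw [if_pos (by positivity), if_neg (by omega)]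
  simp only [show (-(-(m : Int)) - 1).toNat = m - 1 from by omega, Int.toNat_natCast]

theorem pv_low_pos (m : Nat) (h : m ≠ 0) : 0 < (PySem.Int.band (m : Int) (-(m : Int))).toNat := by
  rw [pv_band_self_neg m h, Int.toNat_natCast]
  have h2 : m &&& (m - 1) ≤ m - 1 := Nat.and_le_right
  omega

-- Python's `while m:` loop; m = mask & 0xFFFFFFFF stays a nonnegative Python int throughout,
-- so it is carried as its exact Nat value (`m -= low` is exact Nat subtraction since low ≤ m).
def bLoop (data : Int) (m : Nat) (r : Int) : Int :=
  if h : m = 0 then r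
  else
    let low : Int := PySem.Int.band (m : Int) (-(m : Int))
    bLoop data (m - low.toNat) (2 * r + if PySem.Int.band data low ≠ 0 then 1 else 0)
  termination_by m
  decreasing_by exact Nat.sub_lt (Nat.pos_of_ne_zero h) (pv_low_pos m h)

def bit_reverse_alt (data : Int) (mask : Int) : Int :=
  bLoop data (PySem.Int.band mask 4294967295).toNat 0

-- ===== PRECONDITION & SPEC =====
def Spec_bit_reverse (data : Int) (mask : Int) (out : Int) : Prop := out = bit_reverse_alt data mask
instance (data : Int) (mask : Int) (out : Int) : Decidable (Spec_bit_reverse data mask out) := by unfold Spec_bit_reverse; infer_instance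

-- ===== CLAIM (what is proved, stated in full; the proofs are below) =====
def Claim_equal_bit_reverse : Prop := ∀ (data : Int) (mask : Int), Dom_bit_reverse data mask → Spec_bit_reverse data mask (bit_reverse data mask)

-- ===== LEMMAS AND PROOFS =====

-- A's loop, recast as recursion on the number of remaining positions (positions n-1 down to 0).
def gA (data mask : Int) : Nat → Int → Nat → Int
  | 0, acc, _ => acc
  | k+1, acc, sm =>
    if PySem.Int.band mask (1 <<< k) ≠ 0 then
      if PySem.Int.band data (1 <<< k) ≠ 0 then
        gA data mask k (PySem.Int.bor acc (1 <<< sm)) (sm+1)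
      else
        gA data mask k (PySem.Int.bor acc (0 <<< sm)) (sm+1)
    else gA data mask k acc sm

-- an LSB-to-MSB selection fold over positions below n, driven by the Int mask's bits.
def gB (data mask : Int) : Nat → Int
  | 0 => 0
  | k+1 =>
    if PySem.Int.band (mask >>> k) 1 ≠ 0 then
      gB data mask k * 2 + PySem.Int.band (data >>> k) 1
    else gB data mask k

-- the same fold driven by a Nat mask's testBits, with an explicit initial accumulator.
def hAcc (data : Int) (m : Nat) : Nat → Int → Int
  | 0, r => r
  | k+1, r =>
    if m.testBit k then hAcc data m k r * 2 + PySem.Int.band (data >>> k) 1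
    else hAcc data m k r

theorem one_shiftLeft_int (k : Nat) : ((1 <<< k : Nat) : Int) = ((2^k : Nat) : Int) := by
  rw [Nat.one_shiftLeft]

theorem nat_lor_two_pow (a s : Nat) (h : a < 2^s) : a ||| 2^s = a + 2^s := by
  apply Nat.eq_of_testBit_eq
  intro i
  rw [Nat.testBit_lor, Nat.testBit_two_pow, show a + 2^s = 2^s + a from by omega]
  rcases lt_trichotomy i s with hi | rfl | hi
  · rw [Nat.testBit_two_pow_add_gt hi]
    simp [Nat.ne_of_gt hi]
  · rw [Nat.testBit_two_pow_add_eq, Nat.testBit_lt_two_pow h]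
    simp
  · have hpow : 2^(s+1) ≤ 2^i := Nat.pow_le_pow_right (by norm_num) hi
    have he : 2^(s+1) = 2^s + 2^s := by ring
    rw [Nat.testBit_lt_two_pow (x := 2^s + a) (by omega),
        Nat.testBit_lt_two_pow (x := a) (by omega)]
    simp [Nat.ne_of_lt hi]

theorem bor_two_pow (acc : Int) (s : Nat) (h0 : 0 ≤ acc) (h : acc < 2^s) :
    PySem.Int.bor acc ((1 <<< s : Nat) : Int) = acc + 2^s := by
  rw [one_shiftLeft_int, PySem.Int.bor_of_nonneg h0 (by positivity)]
  obtain ⟨a, rfl⟩ : ∃ a : Nat, acc = (a : Int) := ⟨acc.toNat, by omega⟩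
  have ha : a < 2^s := by exact_mod_cast h
  rw [Int.toNat_natCast, Int.toNat_natCast, nat_lor_two_pow _ _ ha]
  push_cast
  ring

theorem band_one_emod (y : Int) : PySem.Int.band y 1 = y % 2 := by
  rw [PySem.Int.band_one]
  show y.fmod 2 = y % 2
  exact Int.fmod_eq_emod_of_nonneg y (by norm_num)

theorem band_two_pow_shift (x : Int) (k : Nat) :
    PySem.Int.band x ((1 <<< k : Nat) : Int) = PySem.Int.band (x >>> k) 1 * 2^k := by
  rw [one_shiftLeft_int, band_one_emod, Int.shiftRight_eq_div_pow]
  by_cases hx : 0 ≤ x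
  case pos =>
    obtain ⟨n, rfl⟩ : ∃ n : Nat, x = (n : Int) := ⟨x.toNat, by omega⟩
    rw [PySem.Int.band_of_nonneg hx (by positivity), Int.toNat_natCast, Int.toNat_natCast,
        Nat.and_two_pow, Nat.toNat_testBit]
    push_cast
    ring
  case neg =>
    have hx : x < 0 := by omega
    obtain ⟨m, rfl⟩ : ∃ m : Nat, x = -(m : Int) - 1 := ⟨(-x-1).toNat, by omega⟩
    unfold PySem.Int.band
    rw [if_neg (by omega : ¬ (0:Int) ≤ -(m:Int) - 1), if_pos (by positivity : (0:Int) ≤ ((2^k : Nat) : Int))]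
    have h1 : (-(-(m:Int) - 1) - 1) = (m : Int) := by ring
    rw [h1, Int.toNat_natCast, Int.toNat_natCast, Nat.land_comm, Nat.and_two_pow, Nat.toNat_testBit]
    have h2 : (0:Int) < ((2^k : Nat) : Int) := by positivity
    have hm : ((2^k : Nat) : Int) * ((m / 2^k : Nat) : Int) + ((m % 2^k : Nat) : Int) = (m : Int) := by
      exact_mod_cast Nat.div_add_mod m (2^k)
    have hMlt : ((m % 2^k : Nat) : Int) < ((2^k : Nat) : Int) := by
      exact_mod_cast Nat.mod_lt m (by positivity)
    have hM0 : (0:Int) ≤ ((m % 2^k : Nat) : Int) := by positivity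
    have hdiv : (-(m:Int) - 1) / ((2^k : Nat) : Int) = -((m / 2^k : Nat) : Int) - 1 := by
      refine ((Int.ediv_emod_unique h2 (a := -(m:Int) - 1)
        (q := -((m / 2^k : Nat) : Int) - 1)
        (r := ((2^k : Nat) : Int) - 1 - ((m % 2^k : Nat) : Int))).mpr ⟨?_, ?_, ?_⟩).1
      · linear_combination -hm
      · omega
      · omega
    rw [hdiv]
    have hmod : (-((m / 2^k : Nat) : Int) - 1) % 2 = 1 - ((m / 2^k % 2 : Nat) : Int) := by omega
    rw [hmod]
    have hle : m / 2^k % 2 * 2^k ≤ 1 * 2^k := by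
      have : m / 2^k % 2 ≤ 1 := by omega
      exact Nat.mul_le_mul_right _ this
    rw [Nat.cast_sub (by omega : m / 2^k % 2 * 2^k ≤ 2^k)]
    push_cast
    ring

theorem gA_eq_gB (data mask : Int) :
    ∀ (n : Nat) (acc : Int) (sm : Nat), 0 ≤ acc → acc < 2^sm →
      gA data mask n acc sm = acc + gB data mask n * 2^sm := by
  intro n
  induction n with
  | zero => intro acc sm _ _; simp [gA, gB]
  | succ k ih =>
    intro acc sm h0 hlt
    have hmk := band_two_pow_shift mask k
    have hdt := band_two_pow_shift data k
    have hbit : PySem.Int.band (data >>> k) 1 = 0 ∨ PySem.Int.band (data >>> k) 1 = 1 := by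
      rw [band_one_emod]; omega
    have hs : (2:Int)^(sm+1) = 2^sm + 2^sm := by ring
    unfold gA gB
    by_cases hm : PySem.Int.band (mask >>> k) 1 = 0
    · rw [if_neg (by rw [hmk, hm]; simp), if_neg (by simp [hm])]
      exact ih acc sm h0 hlt
    · rw [if_pos (by rw [hmk]; exact mul_ne_zero hm (by positivity)), if_pos hm]
      by_cases hd : PySem.Int.band (data >>> k) 1 = 0
      · rw [if_neg (by rw [hdt, hd]; simp)]
        have hz : ((0 <<< sm : Nat) : Int) = 0 := by simp
        rw [hz, PySem.Int.bor_zero,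
            ih acc (sm+1) h0 (by rw [hs]; omega), hd]
        ring
      · have hd1 : PySem.Int.band (data >>> k) 1 = 1 := by rcases hbit with h | h <;> simp_all
        rw [if_pos (by rw [hdt, hd1]; positivity),
            bor_two_pow acc sm h0 hlt,
            ih (acc + 2^sm) (sm+1) (by positivity) (by rw [hs]; omega), hd1]
        ring

theorem bridgeA (data mask : Int) :
    ∀ (n : Nat) (st : Int × Nat), n ≤ 32 →
      (((List.range' (32 - n) n 1).foldl
        (fun (st : Int × Nat) (ii : Nat) =>
          let reversed_data := st.1
          let shift_msb := st.2
          if PySem.Int.band mask (1 <<< (32 - 1 - ii)) ≠ 0 then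
            let temp := PySem.Int.band data (1 <<< (32 - 1 - ii))
            if temp ≠ 0 then
              (PySem.Int.bor reversed_data (1 <<< shift_msb), shift_msb + 1)
            else
              (PySem.Int.bor reversed_data (0 <<< shift_msb), shift_msb + 1)
          else st) st).1) = gA data mask n st.1 st.2 := by
  intro n
  induction n with
  | zero => intro st _; simp [gA]
  | succ k ih =>
    intro st hk
    have h1 : 32 - (k+1) + 1 = 32 - k := by omega
    have h2 : 32 - 1 - (32 - (k+1)) = k := by omega
    simp only [List.range'_succ, List.foldl_cons, h1, h2]
    unfold gA
    by_cases hm : PySem.Int.band mask (1 <<< k) ≠ 0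
    · rw [if_pos hm, if_pos hm]
      by_cases hd : PySem.Int.band data (1 <<< k) ≠ 0
      · rw [if_pos hd, if_pos hd]
        exact ih _ (by omega)
      · rw [if_neg hd, if_neg hd]
        exact ih _ (by omega)
    · rw [if_neg hm, if_neg hm]
      exact ih _ (by omega)

-- ---- B-side lemmas: the Kernighan loop equals the LSB-to-MSB selection fold ----

theorem pv_band_low32 (x : Int) : PySem.Int.band x 4294967295 = x % 4294967296 := by
  unfold PySem.Int.band
  by_cases hx : 0 ≤ x
  · rw [if_pos hx, if_pos (by norm_num)]
    obtain ⟨n, rfl⟩ : ∃ n : Nat, x = (n : Int) := ⟨x.toNat, by omega⟩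
    rw [Int.toNat_natCast, show ((4294967295:Int)).toNat = 2^32 - 1 from by decide,
        Nat.and_two_pow_sub_one_eq_mod]
    omega
  · rw [if_neg hx, if_pos (by norm_num)]
    obtain ⟨n, rfl⟩ : ∃ n : Nat, x = -(n : Int) - 1 := ⟨(-x-1).toNat, by omega⟩
    rw [show (-(-(n:Int) - 1) - 1).toNat = n from by omega,
        show ((4294967295:Int)).toNat = 2^32 - 1 from by decide,
        Nat.land_comm, Nat.and_two_pow_sub_one_eq_mod]
    omega

theorem pv_mod_pow_div (x : Int) (k : Nat) (hk : k < 32) :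
    (x % 4294967296) / (2^k : Int) % 2 = x / (2^k : Int) % 2 := by
  have hpow : (2:Int)^k * 2^(32-k) = 4294967296 := by
    rw [← pow_add, show k + (32-k) = 32 from by omega]
    norm_num
  have hx : x = (x % 4294967296) + 2^k * (2^(32-k) * (x / 4294967296)) := by
    rw [← mul_assoc, hpow]
    omega
  have hdiv : x / (2^k : Int) = (x % 4294967296) / 2^k + 2^(32-k) * (x / 4294967296) := by
    conv_lhs => rw [hx]
    exact Int.add_mul_ediv_left _ _ (by positivity)
  obtain ⟨c, hc⟩ : (2:Int) ∣ 2^(32-k) * (x / 4294967296) :=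
    Dvd.dvd.mul_right (dvd_pow_self 2 (by omega)) _
  rw [hdiv, hc]
  generalize (x % 4294967296) / (2^k : Int) = t
  omega

theorem pv_mask_bit (mask : Int) (k : Nat) (hk : k < 32) :
    (PySem.Int.band (mask >>> k) 1 ≠ 0) ↔ (PySem.Int.band mask 4294967295).toNat.testBit k = true := by
  rw [pv_band_low32, band_one_emod, Int.shiftRight_eq_div_pow, Nat.testBit_eq_decide_div_mod_eq]
  have hs : ((mask % 4294967296).toNat : Int) = mask % 4294967296 := by omega
  have key : ((mask % 4294967296).toNat : Int) / 2^k % 2 = mask / (2^k : Int) % 2 := by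
    rw [hs]; exact pv_mod_pow_div mask k hk
  have hcast : (((mask % 4294967296).toNat / 2^k % 2 : Nat) : Int)
      = ((mask % 4294967296).toNat : Int) / 2^k % 2 := by push_cast; ring_nf
  have hab : (((mask % 4294967296).toNat / 2^k % 2 : Nat) : Int) = mask / (2^k : Int) % 2 :=
    hcast.trans key
  have hb1 : (0:Int) ≤ mask / (2^k : Int) % 2 := Int.emod_nonneg _ (by norm_num)
  have hb2 : mask / (2^k : Int) % 2 < 2 := Int.emod_lt_of_pos _ (by norm_num)
  simp only [decide_eq_true_eq]
  push_cast
  rcases (by omega : (mask % 4294967296).toNat / 2^k % 2 = 0 ∨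
      (mask % 4294967296).toNat / 2^k % 2 = 1) with h | h
  · rw [h] at hab
    rw [h, ← hab]
    simp
  · rw [h] at hab
    rw [h, ← hab]
    simp

theorem pv_decomp (m : Nat) (h : m ≠ 0) : ∃ l a, m = 2^(l+1)*a + 2^l := by
  obtain ⟨l, o, ho2, hmo⟩ := Nat.exists_eq_pow_mul_and_not_dvd h 2 (by norm_num)
  refine ⟨l, o/2, ?_⟩
  set a := o / 2 with ha
  rw [hmo, show o = 2*a + 1 from by omega, pow_succ]
  ring

theorem pv_div_pow (l a c : Nat) : (2^(l+1)*a + c) / 2^l = 2*a + c / 2^l := by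
  have h : 2^(l+1)*a = 2^l*(2*a) := by rw [pow_succ]; ring
  rw [h, Nat.mul_add_div (Nat.two_pow_pos l)]

theorem pv_testBit_low (l a j : Nat) (hj : j < l) : (2^(l+1)*a + 2^l).testBit j = false := by
  have e1 : (2:Nat)^(l+1) = 2^j * (2 * 2^(l-j)) := by
    rw [← pow_succ', ← pow_add]; congr 1; omega
  have e2 : (2:Nat)^l = 2^j * (2 * 2^(l-j-1)) := by
    rw [← pow_succ', ← pow_add]; congr 1; omega
  have hdiv : (2^(l+1)*a + 2^l) / 2^j = 2 * (2^(l-j)*a + 2^(l-j-1)) := by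
    rw [e1, e2, mul_assoc, ← Nat.mul_add, Nat.mul_div_cancel_left _ (Nat.two_pow_pos j)]
    ring
  rw [Nat.testBit_eq_decide_div_mod_eq, hdiv]
  simp [Nat.mul_mod_right]

theorem pv_testBit_at (l a : Nat) : (2^(l+1)*a + 2^l).testBit l = true := by
  have hdiv : (2^(l+1)*a + 2^l) / 2^l = 2*a + 1 := by
    rw [pv_div_pow, Nat.div_self (Nat.two_pow_pos l)]
  rw [Nat.testBit_eq_decide_div_mod_eq, hdiv]
  simp

theorem pv_testBit_mul_low (l a j : Nat) (hj : j ≤ l) : (2^(l+1)*a).testBit j = false := by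
  have e1 : (2:Nat)^(l+1) = 2^j * (2 * 2^(l-j)) := by
    rw [← pow_succ', ← pow_add]; congr 1; omega
  have hdiv : (2^(l+1)*a) / 2^j = 2 * (2^(l-j)*a) := by
    rw [e1, mul_assoc, Nat.mul_div_cancel_left _ (Nat.two_pow_pos j)]
    ring
  rw [Nat.testBit_eq_decide_div_mod_eq, hdiv]
  simp [Nat.mul_mod_right]

theorem pv_testBit_add_high (l a c j : Nat) (hc : c < 2^(l+1)) (hj : l < j) :
    (2^(l+1)*a + c).testBit j = (2^(l+1)*a).testBit j := by
  have hp : (2:Nat)^j = 2^(l+1) * 2^(j-l-1) := by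
    rw [← pow_add]; congr 1; omega
  have h1 : (2^(l+1)*a + c) / 2^(l+1) = a := by
    rw [Nat.mul_add_div (Nat.two_pow_pos (l+1)), Nat.div_eq_of_lt hc]
    omega
  have h2 : (2^(l+1)*a) / 2^(l+1) = a := Nat.mul_div_cancel_left _ (Nat.two_pow_pos (l+1))
  rw [Nat.testBit_eq_decide_div_mod_eq, Nat.testBit_eq_decide_div_mod_eq, hp,
      ← Nat.div_div_eq_div_mul, ← Nat.div_div_eq_div_mul, h1, h2]

theorem pv_and_pred (l a : Nat) :
    (2^(l+1)*a + 2^l) &&& (2^(l+1)*a + 2^l - 1) = 2^(l+1)*a := by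
  have hpos : 0 < (2:Nat)^l := Nat.two_pow_pos l
  have hpred : 2^(l+1)*a + 2^l - 1 = 2^(l+1)*a + (2^l - 1) := by omega
  apply Nat.eq_of_testBit_eq
  intro j
  rw [Nat.testBit_and, hpred]
  rcases lt_trichotomy j l with hj | rfl | hj
  · rw [pv_testBit_low l a j hj, pv_testBit_mul_low l a j (le_of_lt hj)]
    simp
  · rw [pv_testBit_at j a, pv_testBit_mul_low j a j le_rfl]
    -- (m-1) bit at position j = l is false
    have hdiv : (2^(j+1)*a + (2^j - 1)) / 2^j = 2*a := by
      rw [pv_div_pow, Nat.div_eq_of_lt (by omega)]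
      omega
    rw [Nat.testBit_eq_decide_div_mod_eq, hdiv]
    simp [Nat.mul_mod_right]
  · have hplt : (2:Nat)^l < 2^(l+1) := by
      rw [pow_succ]; omega
    rw [pv_testBit_add_high l a (2^l) j hplt hj,
        pv_testBit_add_high l a (2^l - 1) j (by omega) hj]
    exact Bool.and_self _

theorem pv_low_val (l a : Nat) :
    PySem.Int.band ((2^(l+1)*a + 2^l : Nat) : Int) (-((2^(l+1)*a + 2^l : Nat) : Int))
      = ((2^l : Nat) : Int) := by
  have hpos : 0 < (2:Nat)^l := Nat.two_pow_pos l
  rw [pv_band_self_neg _ (by omega), pv_and_pred l a]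
  congr 1
  omega

theorem hAcc_zero_bits (data : Int) (m : Nat) :
    ∀ (n : Nat) (r : Int), (∀ i, i < n → m.testBit i = false) → hAcc data m n r = r := by
  intro n
  induction n with
  | zero => intro r _; rfl
  | succ k ih =>
    intro r h
    unfold hAcc
    rw [h k (by omega)]
    simp only [Bool.false_eq_true, if_false]
    exact ih r (fun i hi => h i (by omega))

theorem pv_shift (data : Int) (l a : Nat) (r d : Int)
    (hd : d = if PySem.Int.band data ((2^l : Nat) : Int) ≠ 0 then (1:Int) else 0) :
    ∀ j, l < j → hAcc data (2^(l+1)*a) j (2*r + d) = hAcc data (2^(l+1)*a + 2^l) j r := by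
  have hplt : (2:Nat)^l < 2^(l+1) := Nat.pow_lt_pow_right (by norm_num) (by omega)
  have hbd := band_two_pow_shift data l
  have hbit : PySem.Int.band (data >>> l) 1 = 0 ∨ PySem.Int.band (data >>> l) 1 = 1 := by
    rw [band_one_emod]; omega
  have hb2 : PySem.Int.band data ((2^l : Nat) : Int) = PySem.Int.band (data >>> l) 1 * 2^l := by
    rw [← one_shiftLeft_int]
    exact hbd
  have hdval : d = PySem.Int.band (data >>> l) 1 := by
    rcases hbit with h | h
    · rw [hd, if_neg (by rw [hb2, h]; simp), h]
    · rw [hd, if_pos (by rw [hb2, h]; norm_num), h]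
  intro j
  induction j with
  | zero => omega
  | succ k ih =>
    intro hk
    unfold hAcc
    by_cases hkl : l < k
    · rw [pv_testBit_add_high l a (2^l) k hplt hkl, ih hkl]
    · have hkeq : k = l := by omega
      subst hkeq
      rw [pv_testBit_at k a, pv_testBit_mul_low k a k le_rfl]
      simp only [Bool.false_eq_true, if_false, if_true]
      rw [hAcc_zero_bits data _ k (2*r+d) (fun i hi => pv_testBit_mul_low k a i (by omega)),
          hAcc_zero_bits data _ k r (fun i hi => pv_testBit_low k a i hi), hdval]
      ring

theorem pv_bLoop_eq (data : Int) :
    ∀ (m : Nat), ∀ (n : Nat) (r : Int), m < 2^n → bLoop data m r = hAcc data m n r := by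
  intro m
  induction m using Nat.strong_induction_on with
  | _ m IH =>
    intro n r hmn
    by_cases h0 : m = 0
    · subst h0
      rw [bLoop, dif_pos rfl, hAcc_zero_bits data 0 n r (fun i _ => Nat.zero_testBit i)]
    · obtain ⟨l, a, hm⟩ := pv_decomp m h0
      have hpos : 0 < (2:Nat)^l := Nat.two_pow_pos l
      have hl : l < n := by
        have h1 : 2^l ≤ m := by omega
        have h2 : (2:Nat)^l < 2^n := by omega
        exact (Nat.pow_lt_pow_iff_right (by norm_num)).mp h2
      have hlow : PySem.Int.band (m : Int) (-(m : Int)) = ((2^l : Nat) : Int) := by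
        rw [hm]; exact pv_low_val l a
      rw [bLoop, dif_neg h0]
      simp only [hlow, Int.toNat_natCast]
      rw [IH (m - 2^l) (by omega) n _ (by omega)]
      have hm' : m - 2^l = 2^(l+1)*a := by omega
      rw [hm', hm]
      exact pv_shift data l a r _ rfl n hl

theorem pv_gB_eq_hAcc (data mask : Int) :
    ∀ n, n ≤ 32 → gB data mask n = hAcc data ((PySem.Int.band mask 4294967295).toNat) n 0 := by
  intro n
  induction n with
  | zero => intro _; rfl
  | succ k ih =>
    intro hk
    have hbit := pv_mask_bit mask k (by omega)
    unfold gB hAcc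
    by_cases hm : PySem.Int.band (mask >>> k) 1 ≠ 0
    · rw [if_pos hm, if_pos (hbit.mp hm), ih (by omega)]
    · rw [if_neg hm]
      have : (PySem.Int.band mask 4294967295).toNat.testBit k = false := by
        rcases Bool.eq_false_or_eq_true ((PySem.Int.band mask 4294967295).toNat.testBit k) with h | h
        · exact absurd (hbit.mpr h) hm
        · exact h
      rw [this]
      simp only [Bool.false_eq_true, if_false]
      exact ih (by omega)

theorem bridgeB (data mask : Int) : bit_reverse_alt data mask = gB data mask 32 := by
  unfold bit_reverse_alt
  have hlt : (PySem.Int.band mask 4294967295).toNat < 2^32 := by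
    rw [pv_band_low32]
    omega
  rw [pv_bLoop_eq data _ 32 0 hlt, pv_gB_eq_hAcc data mask 32 le_rfl]

-- ===== VERDICT (by name: the statement is the Claim_ definition above) =====
theorem bit_reverse_spec : Claim_equal_bit_reverse := by
  intro data mask _
  show bit_reverse data mask = bit_reverse_alt data mask
  have hA : bit_reverse data mask = gA data mask 32 0 0 := by
    have h := bridgeA data mask 32 (0, 0) le_rfl
    rw [show (32:Nat) - 32 = 0 from rfl, ← List.range_eq_range'] at h
    exact h
  rw [hA, bridgeB, gA_eq_gB data mask 32 0 0 le_rfl (by norm_num)]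
  norm_num
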